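-- pv_equiv track=rewrite | github.com/piwonskp/md5 | bdayblank.py | bdayblank
-- ===== SOURCE A (Python) =====
-- import math
--
-- def bdayblank(o,f):
--     original = [o]
--     fake = [f]
--     originalhash=[trivial_hash(o)]
--     fakehash=[trivial_hash(f)]
--     iteration=0
--     blanks = [chr(0),chr(7),chr(8),chr(9),chr(10),chr(13),chr(32),chr(255)]
--     while True:
--         longest=int(math.pow(len(blanks),iteration))
--         iteration+=1
--         temporig = original[-longest:]
--         tempfake = fake[-longest:]
--         for char in blanks:
--                 for string in temporig:
--                     original.append(string+char)
--                     result = search(fakehash, originalhash, string+char)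
--                     if not result==None:
--                         result[0]=fake[result[0]]
--                         return result
--                 for string in tempfake:
--                     fake.append(string+char)
--                     result = search(originalhash, fakehash, string+char)
--                     if not result==None:
--                         result[0]=original[result[0]]
--                         return result
--
-- def search(hashes1, hashes2, word):
--     wordhash=trivial_hash(word)
--     hashes2.append(wordhash)
--     for i in range(len(hashes1)):
--         if hashes1[i]==wordhash:
--             return [i, word]
--
-- def trivial_hash(dane):
--         hash = 0
--         for znak in dane:
--                 hash += ord(znak)
--         return hash % 999
-- ===== SOURCE B (Python) =====
-- def _probe(base, h0, length, n, other, mine, ords):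
--     # decode the suffix from n's base-8 digits (least significant digit = first appended char)
--     h, suf, m = 0, [], n
--     for _ in range(length):
--         d = m % 8
--         m //= 8
--         h += ords[d]
--         suf.append(chr(ords[d]))
--     word = base + ''.join(suf)
--     nh = (h0 + h) % 999
--     if nh in other:
--         return [other[nh], word]
--     if nh not in mine:
--         mine[nh] = word
--     return None
--
--
-- def bdayblank(o, f):
--     ords = [0, 7, 8, 9, 10, 13, 32, 255]
--     ho = sum(map(ord, o)) % 999
--     hf = sum(map(ord, f)) % 999
--     ofirst = {ho: o}   # hash -> first original-side word with that hash
--     ffirst = {hf: f}   # hash -> first fake-side word with that hash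
--     length = 1         # current suffix length
--     while True:
--         block = 8 ** (length - 1)
--         for ci in range(8):
--             for si in range(block):
--                 r = _probe(o, ho, length, ci * block + si, ffirst, ofirst, ords)
--                 if r is not None:
--                     return r
--             for si in range(block):
--                 r = _probe(f, hf, length, ci * block + si, ofirst, ffirst, ords)
--                 if r is not None:
--                     return r
--         length += 1
-- ===== Notes on version B (the rewrite author's own statement) =====
-- stated objective: faster
-- what changed: B discards A's breadth-first growth of explicit original/fake string lists (with slicing, re-hashing every word and a linear scan of the opposite hash list per candidate): instead each candidate word is decoded arithmetically from a counter's base-8 digits (digit i = i-th appended blank), its hash computed from the digit sum, and two hash-to-first-word tables of at most 999 entries replace the ever-growing lists entirely, so memory is O(1) in the number of candidates and each candidate costs O(suffix length) instead of a scan over all words seen so far.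
import Mathlib
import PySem

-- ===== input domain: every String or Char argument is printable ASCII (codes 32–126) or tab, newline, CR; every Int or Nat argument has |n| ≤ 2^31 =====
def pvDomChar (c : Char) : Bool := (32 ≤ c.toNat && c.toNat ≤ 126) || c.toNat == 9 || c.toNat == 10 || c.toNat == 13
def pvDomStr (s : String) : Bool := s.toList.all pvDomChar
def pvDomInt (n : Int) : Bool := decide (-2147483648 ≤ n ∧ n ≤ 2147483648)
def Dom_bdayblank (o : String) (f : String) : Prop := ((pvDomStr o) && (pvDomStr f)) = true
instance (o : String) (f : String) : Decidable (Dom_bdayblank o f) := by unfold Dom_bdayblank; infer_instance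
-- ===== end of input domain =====

-- B replaces A's breadth-first growth of explicit original/fake word lists (with slicing, full
-- re-hashing and a linear scan of the opposite hash list per candidate) by a stateless radix
-- enumeration: each candidate word is decoded from a counter's base-8 digits, its hash comes from
-- the digit sum, and two hash→first-word tables (≤ 999 entries) replace the growing lists; same
-- return value, intended as faster.  Both ports carry a fuel counter only to make the while-True
-- loop total; it is a guard, never part of the algorithm.

-- ===== PORT A =====

def trivialHash (dane : List Char) : Nat :=
  (dane.foldl (fun hash znak => hash + znak.toNat) 0) % 999

def blanksA : List Char :=
  [Char.ofNat 0, Char.ofNat 7, Char.ofNat 8, Char.ofNat 9,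
   Char.ofNat 10, Char.ofNat 13, Char.ofNat 32, Char.ofNat 255]

structure StA where
  original : List (List Char)
  fake : List (List Char)
  ohash : List Nat
  fhash : List Nat
deriving Repr

-- search(hashes1, hashes2, word): appends trivial_hash(word) to hashes2, linearly scans hashes1
def searchA (hashes1 hashes2 : List Nat) (word : List Char) :
    List Nat × Option (Nat × List Char) :=
  let wordhash := trivialHash word
  (hashes2 ++ [wordhash],
   match hashes1.findIdx? (fun h => h == wordhash) with
   | some i => some (i, word)
   | none => none)

-- 'for string in temporig: original.append(...); result = search(fakehash, originalhash, ...)'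
def origLoopA (st : StA) (c : Char) : List (List Char) → StA ⊕ List (List Char)
  | [] => .inl st
  | s :: rest =>
    let w := s ++ [c]
    let st1 : StA := { st with original := st.original ++ [w] }
    match searchA st1.fhash st1.ohash w with
    | (_, some (i, word)) => .inr [st1.fake.getD i [], word]  -- fake[i]: i < len(fake) as fhash parallels fake
    | (oh, none) => origLoopA { st1 with ohash := oh } c rest

-- 'for string in tempfake: fake.append(...); result = search(originalhash, fakehash, ...)'
def fakeLoopA (st : StA) (c : Char) : List (List Char) → StA ⊕ List (List Char)
  | [] => .inl st
  | s :: rest =>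
    let w := s ++ [c]
    let st1 : StA := { st with fake := st.fake ++ [w] }
    match searchA st1.ohash st1.fhash w with
    | (_, some (i, word)) => .inr [st1.original.getD i [], word]
    | (fh, none) => fakeLoopA { st1 with fhash := fh } c rest

-- 'for char in blanks: …'
def charLoopA (st : StA) (temporig tempfake : List (List Char)) :
    List Char → StA ⊕ List (List Char)
  | [] => .inl st
  | c :: cs =>
    match origLoopA st c temporig with
    | .inr r => .inr r
    | .inl st' =>
      match fakeLoopA st' c tempfake with
      | .inr r => .inr r
      | .inl st'' => charLoopA st'' temporig tempfake cs

-- 'while True: …' (fuel is only a totality guard)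
def mainLoopA : Nat → Nat → StA → List (List Char)
  | 0, _, _ => []
  | fuel + 1, iteration, st =>
    let longest : Nat := 8 ^ iteration
    let temporig := PySem.List.slice st.original (some (-(longest : Int))) none
    let tempfake := PySem.List.slice st.fake (some (-(longest : Int))) none
    match charLoopA st temporig tempfake blanksA with
    | .inr r => r
    | .inl st' => mainLoopA fuel (iteration + 1) st'

def bdayblank (o : String) (f : String) : List String :=
  let ol := o.toList
  let fl := f.toList
  (mainLoopA 999 0 ⟨[ol], [fl], [trivialHash ol], [trivialHash fl]⟩).map String.ofList

-- ===== PORT B =====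

def ordsB : List Nat := [0, 7, 8, 9, 10, 13, 32, 255]

def hashB (s : List Char) : Nat := ((s.map Char.toNat).sum) % 999  -- sum(map(ord, s)) % 999

-- the digit loop of _probe: 'for _ in range(length): d = m % 8; m //= 8; h += ords[d]; suf.append(chr(ords[d]))'
def decodeLoopB : Nat → Nat → Nat → List Char → Nat × List Char
  | 0, _, h, suf => (h, suf)
  | len + 1, m, h, suf =>
    decodeLoopB len (m / 8) (h + ordsB.getD (m % 8) 0)
      (suf ++ [Char.ofNat (ordsB.getD (m % 8) 0)])

-- _probe(base, h0, length, n, other, mine, ords): returns (updated mine, optional result)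
def probeB (base : List Char) (h0 len n : Nat)
    (other mine : PySem.Dict Nat (List Char)) :
    PySem.Dict Nat (List Char) × Option (List (List Char)) :=
  let hs := decodeLoopB len n 0 []
  let word := base ++ hs.2
  let nh := (h0 + hs.1) % 999
  match other.get? nh with
  | some v => (mine, some [v, word])
  | none =>
    match mine.get? nh with
    | none => (mine.insert nh word, none)
    | some _ => (mine, none)

-- 'for si in range(block): r = _probe(...); if r is not None: return r'
def siLoopB (base : List Char) (h0 len nbase : Nat)
    (other mine : PySem.Dict Nat (List Char)) :
    List Nat → PySem.Dict Nat (List Char) ⊕ List (List Char)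
  | [] => .inl mine
  | si :: rest =>
    match probeB base h0 len (nbase + si) other mine with
    | (_, some r) => .inr r
    | (mine', none) => siLoopB base h0 len nbase other mine' rest

-- 'for ci in range(8): <orig block> <fake block>'
def ciLoopB (oB fB : List Char) (ho hf len block : Nat)
    (ofirst ffirst : PySem.Dict Nat (List Char)) :
    List Nat → (PySem.Dict Nat (List Char) × PySem.Dict Nat (List Char)) ⊕ List (List Char)
  | [] => .inl (ofirst, ffirst)
  | ci :: rest =>
    match siLoopB oB ho len (ci * block) ffirst ofirst (List.range block) with
    | .inr r => .inr r
    | .inl ofirst' =>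
      match siLoopB fB hf len (ci * block) ofirst' ffirst (List.range block) with
      | .inr r => .inr r
      | .inl ffirst' => ciLoopB oB fB ho hf len block ofirst' ffirst' rest

-- 'while True: …' (fuel is only a totality guard)
def mainLoopB (oB fB : List Char) (ho hf : Nat) :
    Nat → Nat → PySem.Dict Nat (List Char) → PySem.Dict Nat (List Char) → List (List Char)
  | 0, _, _, _ => []
  | fuel + 1, len, ofirst, ffirst =>
    match ciLoopB oB fB ho hf len (8 ^ (len - 1)) ofirst ffirst (List.range 8) with
    | .inr r => r
    | .inl (o', f') => mainLoopB oB fB ho hf fuel (len + 1) o' f'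

def bdayblank_alt (o : String) (f : String) : List String :=
  let ol := o.toList
  let fl := f.toList
  let ho := hashB ol
  let hf := hashB fl
  (mainLoopB ol fl ho hf 999 1
    (PySem.Dict.empty.insert ho ol) (PySem.Dict.empty.insert hf fl)).map String.ofList

-- ===== PRECONDITION & SPEC =====
def Spec_bdayblank (o : String) (f : String) (out : List String) : Prop := out = bdayblank_alt o f
instance (o : String) (f : String) (out : List String) : Decidable (Spec_bdayblank o f out) := by unfold Spec_bdayblank; infer_instance

-- ===== CLAIM (what is proved, stated in full; the proofs are below) =====
def Claim_equal_bdayblank : Prop := ∀ (o : String) (f : String), Dom_bdayblank o f → Spec_bdayblank o f (bdayblank o f)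

-- ===== LEMMAS AND PROOFS =====

def wordAt (base : List Char) (k n : Nat) : List Char := base ++ (decodeLoopB k n 0 []).2

theorem foldl_add_shift (t : List Char) (n : Nat) :
    t.foldl (fun h z => h + z.toNat) n = n + t.foldl (fun h z => h + z.toNat) 0 := by
  induction t generalizing n with
  | nil => simp
  | cons x t ih => simp only [List.foldl_cons]; rw [ih (n + x.toNat), ih (0 + x.toNat)]; omega

theorem hashB_eq (s : List Char) : hashB s = trivialHash s := by
  unfold hashB trivialHash
  congr 1
  induction s with
  | nil => rfl
  | cons x t ih =>
    simp only [List.map_cons, List.sum_cons, List.foldl_cons, ih]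
    rw [foldl_add_shift t (0 + x.toNat)]
    omega

theorem decode_acc (k : Nat) : ∀ (m h : Nat) (suf : List Char),
    decodeLoopB k m h suf = (h + (decodeLoopB k m 0 []).1, suf ++ (decodeLoopB k m 0 []).2) := by
  induction k with
  | zero => intro m h suf; simp [decodeLoopB]
  | succ k ih =>
    intro m h suf
    simp only [decodeLoopB]
    rw [ih (m / 8) (h + ordsB.getD (m % 8) 0), ih (m / 8) (0 + ordsB.getD (m % 8) 0)]
    simp [Nat.add_assoc]

theorem decode_split (k ci si : Nat) (hci : ci < 8) (hsi : si < 8 ^ k) :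
    decodeLoopB (k + 1) (ci * 8 ^ k + si) 0 [] =
      ((decodeLoopB k si 0 []).1 + ordsB.getD ci 0,
       (decodeLoopB k si 0 []).2 ++ [Char.ofNat (ordsB.getD ci 0)]) := by
  induction k generalizing si with
  | zero =>
    interval_cases si
    simp [decodeLoopB, Nat.mod_eq_of_lt hci]
  | succ k ih =>
    have hn : ci * 8 ^ (k + 1) + si = 8 * (ci * 8 ^ k) + si := by ring
    have hmod : (ci * 8 ^ (k + 1) + si) % 8 = si % 8 := by
      rw [hn, Nat.mul_add_mod]
    have hdiv : (ci * 8 ^ (k + 1) + si) / 8 = ci * 8 ^ k + si / 8 := by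
      rw [hn, Nat.mul_add_div (by norm_num)]
    have hsi8 : si / 8 < 8 ^ k := by
      rw [Nat.div_lt_iff_lt_mul (by norm_num)]
      calc si < 8 ^ (k + 1) := hsi
        _ = 8 ^ k * 8 := by rw [pow_succ]
    have step1 : decodeLoopB (k + 1 + 1) (ci * 8 ^ (k + 1) + si) 0 [] =
        decodeLoopB (k + 1) (ci * 8 ^ k + si / 8) (0 + ordsB.getD (si % 8) 0)
          ([] ++ [Char.ofNat (ordsB.getD (si % 8) 0)]) := by
      rw [show decodeLoopB (k + 1 + 1) (ci * 8 ^ (k + 1) + si) 0 [] =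
          decodeLoopB (k + 1) ((ci * 8 ^ (k + 1) + si) / 8)
            (0 + ordsB.getD ((ci * 8 ^ (k + 1) + si) % 8) 0)
            ([] ++ [Char.ofNat (ordsB.getD ((ci * 8 ^ (k + 1) + si) % 8) 0)]) from rfl,
        hmod, hdiv]
    rw [step1, decode_acc (k + 1), ih (si / 8) hsi8]
    conv_rhs =>
      rw [show decodeLoopB (k + 1) si 0 [] =
          decodeLoopB k (si / 8) (0 + ordsB.getD (si % 8) 0)
            ([] ++ [Char.ofNat (ordsB.getD (si % 8) 0)]) from rfl,
        decode_acc k]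
    refine Prod.ext ?_ ?_
    · simp; omega
    · simp

theorem ord_char_toNat (d : Nat) : (Char.ofNat (ordsB.getD d 0)).toNat = ordsB.getD d 0 := by
  match d with
  | 0 | 1 | 2 | 3 | 4 | 5 | 6 | 7 => decide
  | n + 8 =>
    rw [List.getD_eq_default]
    · decide
    · simp [ordsB]

theorem decode_sum (k : Nat) : ∀ n : Nat,
    (decodeLoopB k n 0 []).1 = (((decodeLoopB k n 0 []).2).map Char.toNat).sum := by
  induction k with
  | zero => intro n; simp [decodeLoopB]
  | succ k ih =>
    intro n
    rw [show decodeLoopB (k + 1) n 0 [] =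
        decodeLoopB k (n / 8) (0 + ordsB.getD (n % 8) 0)
          ([] ++ [Char.ofNat (ordsB.getD (n % 8) 0)]) from rfl,
      decode_acc k]
    simp only [List.nil_append, List.map_append, List.map_cons, List.map_nil,
      List.sum_append, List.sum_cons, List.sum_nil, ord_char_toNat]
    rw [← ih (n / 8)]
    omega

theorem nh_eq (base : List Char) (k n : Nat) :
    (hashB base + (decodeLoopB k n 0 []).1) % 999 = trivialHash (wordAt base k n) := by
  rw [← hashB_eq]
  unfold hashB wordAt
  rw [List.map_append, List.sum_append, ← decode_sum]
  omega

theorem scan_eq_find (xs : List (List Char)) (h : Nat) :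
    (match (xs.map trivialHash).findIdx? (fun x => x == h) with
     | some i => some (xs.getD i [])
     | none => none) = xs.find? (fun s => trivialHash s == h) := by
  induction xs with
  | nil => rfl
  | cons x t ih =>
    simp only [List.map_cons, List.findIdx?_cons, List.find?_cons]
    by_cases hx : trivialHash x == h
    · simp [hx]
    · simp only [hx, Bool.false_eq_true, reduceIte]
      rw [← ih]
      cases hfi : (t.map trivialHash).findIdx? (fun x => x == h) <;> simp

theorem find?_append_hash (xs : List (List Char)) (w : List Char) (h : Nat) :
    (xs ++ [w]).find? (fun s => trivialHash s == h) =
      ((xs.find? (fun s => trivialHash s == h)).or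
        (if trivialHash w == h then some w else none)) := by
  rw [List.find?_append]
  cases hx : xs.find? (fun s => trivialHash s == h) <;> by_cases hw : trivialHash w == h <;>
    simp_all [Option.or]

def InvAB (a : StA) (ofirst ffirst : PySem.Dict Nat (List Char)) : Prop :=
  a.ohash = a.original.map trivialHash ∧
  a.fhash = a.fake.map trivialHash ∧
  (∀ h, ofirst.get? h = a.original.find? (fun s => trivialHash s == h)) ∧
  (∀ h, ffirst.get? h = a.fake.find? (fun s => trivialHash s == h))

-- dict update step: first-string-by-hash map stays correct when a word is appended
theorem dict_step (d : PySem.Dict Nat (List Char)) (xs : List (List Char)) (w : List Char)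
    (hd : ∀ h, d.get? h = xs.find? (fun s => trivialHash s == h))
    (hnone : d.get? (trivialHash w) = none) :
    ∀ h, (d.insert (trivialHash w) w).get? h = (xs ++ [w]).find? (fun s => trivialHash s == h) := by
  intro h
  rw [find?_append_hash, PySem.Dict.get?_insert]
  by_cases hh : h = trivialHash w
  · subst hh
    rw [if_pos rfl, ← hd, hnone]
    simp
  · rw [if_neg hh, hd]
    have : (trivialHash w == h) = false := by simpa using fun hc => hh hc.symm
    simp [this]

theorem dict_step_keep (d : PySem.Dict Nat (List Char)) (xs : List (List Char)) (w : List Char)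
    (hd : ∀ h, d.get? h = xs.find? (fun s => trivialHash s == h))
    (hsome : (d.get? (trivialHash w)).isSome) :
    ∀ h, d.get? h = (xs ++ [w]).find? (fun s => trivialHash s == h) := by
  intro h
  rw [find?_append_hash, hd]
  by_cases hh : h = trivialHash w
  · subst hh
    rw [← hd]
    cases hx : d.get? (trivialHash w) with
    | none => rw [hx] at hsome; simp at hsome
    | some v => simp
  · have : (trivialHash w == h) = false := by simpa using fun hc => hh hc.symm
    simp [this]

theorem origLoop_sim (sis : List Nat) (oBase : List Char) (a : StA)
    (ofirst ffirst : PySem.Dict Nat (List Char)) (ci k : Nat) (hci : ci < 8)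
    (hall : ∀ si ∈ sis, si < 8 ^ k) (hInv : InvAB a ofirst ffirst) :
    (∃ a' ofirst',
       origLoopA a (Char.ofNat (ordsB.getD ci 0)) (sis.map (wordAt oBase k)) = .inl a' ∧
       siLoopB oBase (hashB oBase) (k + 1) (ci * 8 ^ k) ffirst ofirst sis = .inl ofirst' ∧
       InvAB a' ofirst' ffirst ∧
       a'.original = a.original ++ sis.map (fun si => wordAt oBase (k + 1) (ci * 8 ^ k + si)) ∧
       a'.fake = a.fake ∧ a'.fhash = a.fhash) ∨
    (∃ r, origLoopA a (Char.ofNat (ordsB.getD ci 0)) (sis.map (wordAt oBase k)) = .inr r ∧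
          siLoopB oBase (hashB oBase) (k + 1) (ci * 8 ^ k) ffirst ofirst sis = .inr r) := by
  induction sis generalizing a ofirst with
  | nil =>
    left
    exact ⟨a, ofirst, rfl, rfl, hInv, by simp, rfl, rfl⟩
  | cons si rest ih =>
    obtain ⟨h1, h2, h3, h4⟩ := hInv
    have hsi : si < 8 ^ k := hall si (by simp)
    have hrest : ∀ s ∈ rest, s < 8 ^ k := fun s hs => hall s (by simp [hs])
    have hsplit := decode_split k ci si hci hsi
    have hw : wordAt oBase k si ++ [Char.ofNat (ordsB.getD ci 0)] =
        wordAt oBase (k + 1) (ci * 8 ^ k + si) := by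
      unfold wordAt
      rw [hsplit]
      simp
    have hnh := nh_eq oBase (k + 1) (ci * 8 ^ k + si)
    simp only [List.map_cons, origLoopA, siLoopB, probeB, searchA, hw, hnh, h4]
    have hword : oBase ++ (decodeLoopB (k + 1) (ci * 8 ^ k + si) 0 []).2 =
        wordAt oBase (k + 1) (ci * 8 ^ k + si) := rfl
    rw [hword]
    set w := wordAt oBase (k + 1) (ci * 8 ^ k + si) with hwdef
    have hscan := scan_eq_find a.fake (trivialHash w)
    rw [← h2] at hscan
    cases hfind : a.fake.find? (fun t => trivialHash t == trivialHash w) with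
    | some v =>
      right
      rw [hfind] at hscan
      cases hidx : a.fhash.findIdx? (fun x => x == trivialHash w) with
      | none => rw [hidx] at hscan; simp at hscan
      | some i =>
        rw [hidx] at hscan
        simp only [Option.some.injEq] at hscan
        refine ⟨[v, w], ?_, rfl⟩
        simp [List.getD] at hscan
        simp [hscan]
    | none =>
      have hidx : a.fhash.findIdx? (fun x => x == trivialHash w) = none := by
        cases hx : a.fhash.findIdx? (fun x => x == trivialHash w) with
        | none => rfl
        | some i => rw [hx, hfind] at hscan; simp at hscan
      simp only [hidx]
      cases hof : ofirst.get? (trivialHash w) with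
      | none =>
        have hInv' : InvAB ⟨a.original ++ [w], a.fake, a.ohash ++ [trivialHash w], a.fhash⟩
            (ofirst.insert (trivialHash w) w) ffirst :=
          ⟨by simp [h1], h2, dict_step ofirst a.original w h3 hof, h4⟩
        rcases ih ⟨a.original ++ [w], a.fake, a.ohash ++ [trivialHash w], a.fhash⟩
            (ofirst.insert (trivialHash w) w) hrest hInv' with
          (⟨a', ofirst', e1, e2, e3, e4, e5, e6⟩ | ⟨r, e1, e2⟩)
        · exact Or.inl ⟨a', ofirst', e1, e2, e3, by simp [e4, hwdef], e5, e6⟩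
        · exact Or.inr ⟨r, e1, e2⟩
      | some u =>
        have hInv' : InvAB ⟨a.original ++ [w], a.fake, a.ohash ++ [trivialHash w], a.fhash⟩
            ofirst ffirst :=
          ⟨by simp [h1], h2, dict_step_keep ofirst a.original w h3 (by simp [hof]), h4⟩
        rcases ih ⟨a.original ++ [w], a.fake, a.ohash ++ [trivialHash w], a.fhash⟩
            ofirst hrest hInv' with
          (⟨a', ofirst', e1, e2, e3, e4, e5, e6⟩ | ⟨r, e1, e2⟩)
        · exact Or.inl ⟨a', ofirst', e1, e2, e3, by simp [e4, hwdef], e5, e6⟩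
        · exact Or.inr ⟨r, e1, e2⟩

theorem fakeLoop_sim (sis : List Nat) (fBase : List Char) (a : StA)
    (ofirst ffirst : PySem.Dict Nat (List Char)) (ci k : Nat) (hci : ci < 8)
    (hall : ∀ si ∈ sis, si < 8 ^ k) (hInv : InvAB a ofirst ffirst) :
    (∃ a' ffirst',
       fakeLoopA a (Char.ofNat (ordsB.getD ci 0)) (sis.map (wordAt fBase k)) = .inl a' ∧
       siLoopB fBase (hashB fBase) (k + 1) (ci * 8 ^ k) ofirst ffirst sis = .inl ffirst' ∧
       InvAB a' ofirst ffirst' ∧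
       a'.fake = a.fake ++ sis.map (fun si => wordAt fBase (k + 1) (ci * 8 ^ k + si)) ∧
       a'.original = a.original ∧ a'.ohash = a.ohash) ∨
    (∃ r, fakeLoopA a (Char.ofNat (ordsB.getD ci 0)) (sis.map (wordAt fBase k)) = .inr r ∧
          siLoopB fBase (hashB fBase) (k + 1) (ci * 8 ^ k) ofirst ffirst sis = .inr r) := by
  induction sis generalizing a ffirst with
  | nil =>
    left
    exact ⟨a, ffirst, rfl, rfl, hInv, by simp, rfl, rfl⟩
  | cons si rest ih =>
    obtain ⟨h1, h2, h3, h4⟩ := hInv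
    have hsi : si < 8 ^ k := hall si (by simp)
    have hrest : ∀ s ∈ rest, s < 8 ^ k := fun s hs => hall s (by simp [hs])
    have hsplit := decode_split k ci si hci hsi
    have hw : wordAt fBase k si ++ [Char.ofNat (ordsB.getD ci 0)] =
        wordAt fBase (k + 1) (ci * 8 ^ k + si) := by
      unfold wordAt
      rw [hsplit]
      simp
    have hnh := nh_eq fBase (k + 1) (ci * 8 ^ k + si)
    simp only [List.map_cons, fakeLoopA, siLoopB, probeB, searchA, hw, hnh, h3]
    have hword : fBase ++ (decodeLoopB (k + 1) (ci * 8 ^ k + si) 0 []).2 =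
        wordAt fBase (k + 1) (ci * 8 ^ k + si) := rfl
    rw [hword]
    set w := wordAt fBase (k + 1) (ci * 8 ^ k + si) with hwdef
    have hscan := scan_eq_find a.original (trivialHash w)
    rw [← h1] at hscan
    cases hfind : a.original.find? (fun t => trivialHash t == trivialHash w) with
    | some v =>
      right
      rw [hfind] at hscan
      cases hidx : a.ohash.findIdx? (fun x => x == trivialHash w) with
      | none => rw [hidx] at hscan; simp at hscan
      | some i =>
        rw [hidx] at hscan
        simp only [Option.some.injEq] at hscan
        refine ⟨[v, w], ?_, rfl⟩
        simp [List.getD] at hscan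
        simp [hscan]
    | none =>
      have hidx : a.ohash.findIdx? (fun x => x == trivialHash w) = none := by
        cases hx : a.ohash.findIdx? (fun x => x == trivialHash w) with
        | none => rfl
        | some i => rw [hx, hfind] at hscan; simp at hscan
      simp only [hidx]
      cases hof : ffirst.get? (trivialHash w) with
      | none =>
        have hInv' : InvAB ⟨a.original, a.fake ++ [w], a.ohash, a.fhash ++ [trivialHash w]⟩
            ofirst (ffirst.insert (trivialHash w) w) :=
          ⟨h1, by simp [h2], h3, dict_step ffirst a.fake w h4 hof⟩
        rcases ih ⟨a.original, a.fake ++ [w], a.ohash, a.fhash ++ [trivialHash w]⟩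
            (ffirst.insert (trivialHash w) w) hrest hInv' with
          (⟨a', ffirst', e1, e2, e3, e4, e5, e6⟩ | ⟨r, e1, e2⟩)
        · exact Or.inl ⟨a', ffirst', e1, e2, e3, by simp [e4, hwdef], e5, e6⟩
        · exact Or.inr ⟨r, e1, e2⟩
      | some u =>
        have hInv' : InvAB ⟨a.original, a.fake ++ [w], a.ohash, a.fhash ++ [trivialHash w]⟩
            ofirst ffirst :=
          ⟨h1, by simp [h2], h3, dict_step_keep ffirst a.fake w h4 (by simp [hof])⟩
        rcases ih ⟨a.original, a.fake ++ [w], a.ohash, a.fhash ++ [trivialHash w]⟩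
            ffirst hrest hInv' with
          (⟨a', ffirst', e1, e2, e3, e4, e5, e6⟩ | ⟨r, e1, e2⟩)
        · exact Or.inl ⟨a', ffirst', e1, e2, e3, by simp [e4, hwdef], e5, e6⟩
        · exact Or.inr ⟨r, e1, e2⟩

theorem ciLoop_sim (cis : List Nat) (oBase fBase : List Char) (a : StA)
    (ofirst ffirst : PySem.Dict Nat (List Char)) (k : Nat)
    (hall : ∀ ci ∈ cis, ci < 8) (hInv : InvAB a ofirst ffirst) :
    (∃ a' ofirst' ffirst',
       charLoopA a ((List.range (8 ^ k)).map (wordAt oBase k))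
         ((List.range (8 ^ k)).map (wordAt fBase k))
         (cis.map (fun ci => Char.ofNat (ordsB.getD ci 0))) = .inl a' ∧
       ciLoopB oBase fBase (hashB oBase) (hashB fBase) (k + 1) (8 ^ k) ofirst ffirst cis =
         .inl (ofirst', ffirst') ∧
       InvAB a' ofirst' ffirst' ∧
       a'.original = a.original ++ cis.flatMap
         (fun ci => (List.range (8 ^ k)).map (fun si => wordAt oBase (k + 1) (ci * 8 ^ k + si))) ∧
       a'.fake = a.fake ++ cis.flatMap
         (fun ci => (List.range (8 ^ k)).map (fun si => wordAt fBase (k + 1) (ci * 8 ^ k + si)))) ∨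
    (∃ r, charLoopA a ((List.range (8 ^ k)).map (wordAt oBase k))
         ((List.range (8 ^ k)).map (wordAt fBase k))
         (cis.map (fun ci => Char.ofNat (ordsB.getD ci 0))) = .inr r ∧
       ciLoopB oBase fBase (hashB oBase) (hashB fBase) (k + 1) (8 ^ k) ofirst ffirst cis = .inr r) := by
  induction cis generalizing a ofirst ffirst with
  | nil =>
    left
    exact ⟨a, ofirst, ffirst, rfl, rfl, hInv, by simp, by simp⟩
  | cons ci rest ih =>
    have hci : ci < 8 := hall ci (by simp)
    have hrest : ∀ c ∈ rest, c < 8 := fun c hc => hall c (by simp [hc])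
    have hrange : ∀ si ∈ List.range (8 ^ k), si < 8 ^ k := fun si hs => List.mem_range.mp hs
    simp only [List.map_cons, charLoopA, ciLoopB]
    rcases origLoop_sim (List.range (8 ^ k)) oBase a ofirst ffirst ci k hci hrange hInv with
      (⟨a1, ofirst1, e1, e2, e3, e4, e5, e6⟩ | ⟨r, e1, e2⟩)
    · simp only [e1, e2]
      rcases fakeLoop_sim (List.range (8 ^ k)) fBase a1 ofirst1 ffirst ci k hci hrange e3 with
        (⟨a2, ffirst2, g1, g2, g3, g4, g5, g6⟩ | ⟨r, g1, g2⟩)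
      · simp only [g1, g2]
        rcases ih a2 ofirst1 ffirst2 hrest g3 with
          (⟨a', ofirst', ffirst', k1, k2, k3, k4, k5⟩ | ⟨r, k1, k2⟩)
        · left
          refine ⟨a', ofirst', ffirst', k1, k2, k3, ?_, ?_⟩
          · rw [k4, g5, e4]; simp [List.flatMap_cons]
          · rw [k5, g4, e5]; simp [List.flatMap_cons]
        · right; exact ⟨r, k1, k2⟩
      · right; simp only [g1, g2]; exact ⟨r, rfl, rfl⟩
    · right; simp only [e1, e2]; exact ⟨r, rfl, rfl⟩

theorem range_mul_flatMap (a b : Nat) :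
    (List.range a).flatMap (fun i => (List.range b).map (fun j => i * b + j)) =
      List.range (a * b) := by
  induction a with
  | zero => simp
  | succ a ih =>
    rw [List.range_succ, List.flatMap_append, ih, Nat.succ_mul, List.range_add]
    simp

theorem blanksA_eq : blanksA = (List.range 8).map (fun ci => Char.ofNat (ordsB.getD ci 0)) := by
  decide

theorem flatMap_range_word (base : List Char) (k : Nat) :
    (List.range 8).flatMap
        (fun ci => (List.range (8 ^ k)).map (fun si => wordAt base (k + 1) (ci * 8 ^ k + si))) =
      (List.range (8 ^ (k + 1))).map (wordAt base (k + 1)) := by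
  have h8 : (8 : Nat) ^ (k + 1) = 8 * 8 ^ k := by rw [pow_succ, Nat.mul_comm]
  rw [h8, ← range_mul_flatMap 8 (8 ^ k)]
  simp [List.map_flatMap, Function.comp_def]

theorem main_sim (fuel : Nat) : ∀ (k : Nat) (oBase fBase : List Char) (a : StA)
    (ofirst ffirst : PySem.Dict Nat (List Char)) (preO preF : List (List Char)),
    InvAB a ofirst ffirst →
    a.original = preO ++ (List.range (8 ^ k)).map (wordAt oBase k) →
    a.fake = preF ++ (List.range (8 ^ k)).map (wordAt fBase k) →
    mainLoopA fuel k a =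
      mainLoopB oBase fBase (hashB oBase) (hashB fBase) fuel (k + 1) ofirst ffirst := by
  induction fuel with
  | zero => intro _ _ _ _ _ _ _ _ _ _ _; rfl
  | succ fuel ih =>
    intro k oBase fBase a ofirst ffirst preO preF hInv hO hF
    simp only [mainLoopA, mainLoopB, Nat.add_sub_cancel]
    have hsO : PySem.List.slice a.original (some (-((8 ^ k : Nat) : Int))) none =
        (List.range (8 ^ k)).map (wordAt oBase k) := by
      rw [PySem.List.slice_from_neg_natCast _ _ (by positivity), hO]
      simp
    have hsF : PySem.List.slice a.fake (some (-((8 ^ k : Nat) : Int))) none =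
        (List.range (8 ^ k)).map (wordAt fBase k) := by
      rw [PySem.List.slice_from_neg_natCast _ _ (by positivity), hF]
      simp
    rw [hsO, hsF, blanksA_eq]
    rcases ciLoop_sim (List.range 8) oBase fBase a ofirst ffirst k
        (fun ci hc => List.mem_range.mp hc) hInv with
      (⟨a', ofirst', ffirst', e1, e2, e3, e4, e5⟩ | ⟨r, e1, e2⟩)
    · rw [e1, e2]
      rw [flatMap_range_word oBase k] at e4
      rw [flatMap_range_word fBase k] at e5
      exact ih (k + 1) oBase fBase a' ofirst' ffirst' a.original a.fake e3 e4 e5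
    · rw [e1, e2]

theorem init_dict (s : List Char) (h : Nat) :
    (PySem.Dict.empty.insert (trivialHash s) s).get? h =
      [s].find? (fun t => trivialHash t == h) := by
  rw [PySem.Dict.get?_insert]
  by_cases hh : h = trivialHash s
  · subst hh; simp
  · rw [if_neg hh]
    have : (trivialHash s == h) = false := by simpa using fun hc => hh hc.symm
    simp [this, PySem.Dict.get?_empty]

theorem bdayblank_eq (o f : String) : bdayblank o f = bdayblank_alt o f := by
  unfold bdayblank bdayblank_alt
  simp only [hashB_eq]
  congr 1
  have := main_sim 999 0 o.toList f.toList
    ⟨[o.toList], [f.toList], [trivialHash o.toList], [trivialHash f.toList]⟩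
    (PySem.Dict.empty.insert (trivialHash o.toList) o.toList)
    (PySem.Dict.empty.insert (trivialHash f.toList) f.toList)
    [] []
    ⟨rfl, rfl, init_dict o.toList, init_dict f.toList⟩
    (by simp [wordAt, decodeLoopB])
    (by simp [wordAt, decodeLoopB])
  simpa [hashB_eq] using this

-- ===== VERDICT (by name: the statement is the Claim_ definition above) =====
theorem bdayblank_spec : Claim_equal_bdayblank := by
  intro o f _
  unfold Spec_bdayblank
  exact bdayblank_eq o f
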